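-- pv_equiv track=rewrite | github.com/JeffreyBell/jotto | jotto.py | find_best_max
-- ===== SOURCE A (Python) =====
-- import collections
--
-- def jotto_score(a,b) :
--     acnt = collections.Counter(a)
--     bcnt = collections.Counter(b)
--     total = 0
--     for c in acnt :
--         total += min(acnt[c], bcnt[c])
--     return total
--
-- def count_jotto(word, cand) :
--     dist = collections.Counter([jotto_score(word, x) for x in cand])
--     return dist
--
-- def word_max (word, cand) :
--     return max(count_jotto(word, cand).values())
--
-- def find_best_max(cand) :
--     best_value = 9999
--     best_word = "nope"
--     for w in cand :
--         m = word_max(w, cand)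
--         if m < best_value :
--             best_value = m
--             best_word = w
--             print ("picked", best_word, best_value)
--     return best_word
-- ===== SOURCE B (Python) =====
-- # Different decomposition: per-word Counters are built once, only the upper triangle of
-- # the symmetric score matrix is computed (each unordered pair scored once), and each
-- # full row is gathered from the triangle by indexing before the selection loop step.
-- import collections
--
-- def pair_score(ci, cj):
--     return sum(min(v, cj[c]) for c, v in ci.items())
--
-- def find_best_max(cand):
--     counters = [collections.Counter(w) for w in cand]
--     upper = [[pair_score(ci, cj) for cj in counters[i:]]
--              for i, ci in enumerate(counters)]
--     best_value = 9999
--     best_word = "nope"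
--     for i, w in enumerate(cand):
--         row = [upper[j][i - j] for j in range(i)] + upper[i]
--         m = max(collections.Counter(row).values())
--         if m < best_value:
--             best_value = m
--             best_word = w
--             print("picked", best_word, best_value)
--     return best_word
-- ===== Notes on version B (the rewrite author's own statement) =====
-- stated objective: faster
-- what changed: B builds each word's Counter once, computes only the upper triangle of the symmetric pairwise score table (each unordered pair scored once, exploiting the symmetry of the jotto score), gathers every full row from the triangle by indexing, and runs the selection loop over those precomputed rows instead of recomputing every word's score list (with two fresh Counters per pair) inside the loop.
import Mathlib
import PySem

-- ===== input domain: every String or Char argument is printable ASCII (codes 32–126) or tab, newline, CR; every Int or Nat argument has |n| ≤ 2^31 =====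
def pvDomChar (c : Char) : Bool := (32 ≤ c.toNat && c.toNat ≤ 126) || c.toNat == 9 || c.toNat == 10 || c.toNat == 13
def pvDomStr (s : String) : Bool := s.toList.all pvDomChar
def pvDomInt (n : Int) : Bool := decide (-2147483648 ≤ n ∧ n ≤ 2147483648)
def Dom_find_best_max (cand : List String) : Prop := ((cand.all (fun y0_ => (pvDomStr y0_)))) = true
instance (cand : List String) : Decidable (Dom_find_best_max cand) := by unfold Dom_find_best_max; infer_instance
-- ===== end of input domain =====

-- B builds each word's Counter once and, using the symmetry of the jotto score, computes
-- only the upper triangle of the pairwise score table (each unordered pair scored once),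
-- gathering each full row from the triangle by indexing; measured faster by a constant
-- factor. Equivalence is about the RETURN value only (both Pythons also print the same
-- 'picked' lines as a side effect).

-- ===== PORT A =====
def jotto_score (a b : String) : Int :=
  let acnt := PySem.Dict.counter a.toList
  let bcnt := PySem.Dict.counter b.toList
  acnt.keys.foldl (fun total c => total + min (acnt.getD c 0) (bcnt.getD c 0)) 0

def count_jotto (word : String) (cand : List String) : PySem.Dict Int Int :=
  PySem.Dict.counter (cand.map (fun x => jotto_score word x))

-- max() of the (inside find_best_max always nonempty) values list; getD 0 is unreached there
def word_max (word : String) (cand : List String) : Int :=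
  (PySem.List.max? ((count_jotto word cand).values) (fun v => v)).getD 0

def find_best_max (cand : List String) : String :=
  (cand.foldl (fun (st : Int × String) w =>
      let m := word_max w cand
      if m < st.1 then (m, w) else st) (9999, "nope")).2

-- ===== PORT B =====
def pair_score (ci cj : PySem.Dict Char Int) : Int :=
  (ci.items.map (fun cv => min cv.2 (cj.getD cv.1 0))).sum

-- Source B's local 'counters' and 'upper', lifted to helpers so the lemmas can name them
def counters_of (cand : List String) : List (PySem.Dict Char Int) :=
  cand.map (fun w => PySem.Dict.counter w.toList)

def upper_of (cand : List String) : List (List Int) :=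
  (PySem.List.enumerate (counters_of cand)).map (fun ic =>
    (PySem.List.slice (counters_of cand) (some ic.1)).map (fun cj => pair_score ic.2 cj))

-- upper[j][i-j] and upper[i] are always in range; pyGetD's defaults are unreached
def find_best_max_alt (cand : List String) : String :=
  ((PySem.List.enumerate cand).foldl (fun (st : Int × String) iw =>
      let row := (PySem.List.pyRange 0 iw.1).map
            (fun j => PySem.List.pyGetD (PySem.List.pyGetD (upper_of cand) j []) (iw.1 - j) 0)
          ++ PySem.List.pyGetD (upper_of cand) iw.1 []
      let m := (PySem.List.max? ((PySem.Dict.counter row).values) (fun v => v)).getD 0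
      if m < st.1 then (m, iw.2) else st) (9999, "nope")).2

-- ===== PRECONDITION & SPEC =====
def Spec_find_best_max (cand : List String) (out : String) : Prop := out = find_best_max_alt cand
instance (cand : List String) (out : String) : Decidable (Spec_find_best_max cand out) := by unfold Spec_find_best_max; infer_instance

-- ===== CLAIM (what is proved, stated in full; the proofs are below) =====
def Claim_equal_find_best_max : Prop := ∀ (cand : List String), Dom_find_best_max cand → Spec_find_best_max cand (find_best_max cand)

-- ===== LEMMAS AND PROOFS =====

-- B's pair_score on two word-Counters computes A's jotto_score
theorem pair_score_eq (a b : String) :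
    pair_score (PySem.Dict.counter a.toList) (PySem.Dict.counter b.toList) = jotto_score a b := by
  unfold pair_score jotto_score
  rw [PySem.Dict.items_counter,
      PySem.List.foldl_add (g := fun c => min ((PySem.Dict.counter a.toList).getD c 0) ((PySem.Dict.counter b.toList).getD c 0))]
  simp only [PySem.Dict.getD_counter, PySem.Dict.keys_counter, List.map_map, zero_add]
  exact congrArg List.sum (List.map_congr_left (fun c _ => rfl))

-- jotto_score as a Finset sum over all characters of both words
theorem jotto_score_finset (a b : String) :
    jotto_score a b =
      ∑ c ∈ (a.toList ++ b.toList).toFinset,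
        min ((a.toList.count c : Int)) ((b.toList.count c : Int)) := by
  unfold jotto_score
  rw [PySem.List.foldl_add (g := fun c => min ((PySem.Dict.counter a.toList).getD c 0) ((PySem.Dict.counter b.toList).getD c 0))]
  simp only [PySem.Dict.getD_counter, PySem.Dict.keys_counter, zero_add]
  rw [← List.sum_toFinset _ (PySem.Set.nodup_ofList a.toList)]
  rw [show (PySem.Set.ofList a.toList).toFinset = a.toList.toFinset from by
        ext c; simp [PySem.Set.mem_ofList]]
  refine Finset.sum_subset (fun c hc => ?_) (fun c _ hc => ?_)
  · simp only [List.toFinset_append, Finset.mem_union]; exact Or.inl hc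
  · rw [List.mem_toFinset] at hc
    rw [List.count_eq_zero_of_not_mem hc]
    simp

theorem jotto_score_symm (a b : String) : jotto_score a b = jotto_score b a := by
  rw [jotto_score_finset, jotto_score_finset]
  rw [show (b.toList ++ a.toList).toFinset = (a.toList ++ b.toList).toFinset by
        simp [List.toFinset_append, Finset.union_comm]]
  exact Finset.sum_congr rfl (fun c _ => min_comm _ _)

-- row j of the upper triangle: word j scored against the suffix from j
theorem upper_getD (cand : List String) (j : Nat) (hj : j < cand.length) :
    PySem.List.pyGetD (upper_of cand) (j : Int) [] =
      (cand.drop j).map (fun y => jotto_score cand[j] y) := by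
  have hlen : j < (PySem.List.enumerate (counters_of cand)).length := by
    simp [PySem.List.length_enumerate, counters_of, hj]
  unfold upper_of
  rw [PySem.List.pyGetD_natCast, List.getD_eq_getElem _ _ (by simpa using hlen),
      List.getElem_map, PySem.List.getElem_enumerate]
  simp only [zero_add]
  rw [PySem.List.slice_from_natCast]
  unfold counters_of
  simp only [List.getElem_map, ← List.map_drop, List.map_map]
  exact List.map_congr_left (fun y _ => pair_score_eq cand[j] y)

-- the gathered row i is word i's full score list against cand
theorem row_eq (cand : List String) (k : Nat) (hk : k < cand.length) :
    (PySem.List.pyRange 0 (k : Int)).map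
        (fun j => PySem.List.pyGetD (PySem.List.pyGetD (upper_of cand) j []) ((k : Int) - j) 0)
      ++ PySem.List.pyGetD (upper_of cand) (k : Int) [] =
    cand.map (fun y => jotto_score cand[k] y) := by
  rw [upper_getD cand k hk, PySem.List.pyRange_zero_natCast, List.map_map]
  have h1 : (List.range k).map
      (fun j : Nat => PySem.List.pyGetD (PySem.List.pyGetD (upper_of cand) (j : Int) []) ((k : Int) - (j : Int)) 0)
      = (cand.take k).map (fun y => jotto_score cand[k] y) := by
    apply List.ext_getElem
    · simp [List.length_take]; omega
    · intro m hm hm'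
      have hmk : m < k := by simpa using hm
      have hjlt : m < cand.length := by omega
      simp only [List.getElem_map, List.getElem_range, List.getElem_take]
      rw [upper_getD cand m hjlt]
      rw [show (k : Int) - (m : Int) = ((k - m : Nat) : Int) by omega,
          PySem.List.pyGetD_natCast,
          List.getD_eq_getElem _ _ (by simp [List.length_drop]; omega),
          List.getElem_map, List.getElem_drop]
      rw [jotto_score_symm]
      congr 2
      omega
  rw [show ((fun j => PySem.List.pyGetD (PySem.List.pyGetD (upper_of cand) j []) ((k:Int) - j) 0) ∘ (fun k : Nat => (k : Int)))
        = (fun j : Nat => PySem.List.pyGetD (PySem.List.pyGetD (upper_of cand) (j : Int) []) ((k : Int) - (j : Int)) 0) from rfl,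
      h1, ← List.map_append]
  rw [List.take_append_drop]

-- folding over enumerate(l) with a body using only the element is folding over l
theorem foldl_enumerate_snd {α γ : Type} (l : List α) (G : γ → α → γ) (init : γ) :
    (PySem.List.enumerate l).foldl (fun st iw => G st iw.2) init = l.foldl G init := by
  conv_rhs => rw [← PySem.List.map_snd_enumerate l 0, List.foldl_map]

-- ===== VERDICT (by name: the statement is the Claim_ definition above) =====
theorem find_best_max_spec : Claim_equal_find_best_max := by
  intro cand _
  unfold Spec_find_best_max find_best_max find_best_max_alt
  have h : ∀ (st : Int × String), ∀ iw ∈ PySem.List.enumerate cand,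
      (let row := (PySem.List.pyRange 0 iw.1).map
            (fun j => PySem.List.pyGetD (PySem.List.pyGetD (upper_of cand) j []) (iw.1 - j) 0)
          ++ PySem.List.pyGetD (upper_of cand) iw.1 []
       let m := (PySem.List.max? ((PySem.Dict.counter row).values) (fun v => v)).getD 0
       if m < st.1 then (m, iw.2) else st)
      = (if word_max iw.2 cand < st.1 then (word_max iw.2 cand, iw.2) else st) := by
    intro st iw hiw
    rcases (PySem.List.mem_enumerate_iff _ _ _).1 hiw with ⟨k, hk, rfl⟩
    simp only [zero_add, row_eq cand k hk, word_max, count_jotto]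
  rw [PySem.List.foldl_congr_mem _ _
        (fun (st : Int × String) (iw : Int × String) =>
          if word_max iw.2 cand < st.1 then (word_max iw.2 cand, iw.2) else st) _
        (fun st iw hiw => h st iw hiw),
      foldl_enumerate_snd cand
        (fun (st : Int × String) w => if word_max w cand < st.1 then (word_max w cand, w) else st)
        (9999, "nope")]
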